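-- pv_equiv track=rewrite | github.com/aws-samples/industrial-data-store-simulation-chatbot | app_factory/production_meeting_agents/tools/database_tools.py | _generate_equipment_insights
-- ===== SOURCE A (Python) =====
-- from typing import Dict, Any, List, Optional
--
-- def _generate_equipment_insights(rows: List[Dict]) -> List[str]:
--     """Generate equipment specific insights."""
--     insights = []
--
--     if not rows:
--         return ['No equipment data available']
--
--     # Count equipment status if available
--     status_counts = {}
--     for row in rows:
--         if 'Status' in row and row['Status']:
--             status = row['Status']
--             status_counts[status] = status_counts.get(status, 0) + 1
--
--     if status_counts:
--         if status_counts.get('breakdown', 0) > 0: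
--             insights.append(f"{status_counts['breakdown']} machines in breakdown status - immediate attention needed")
--         if status_counts.get('maintenance', 0) > 0:
--             insights.append(f"{status_counts['maintenance']} machines in maintenance")
--
--     return insights
-- ===== SOURCE B (Python) =====
-- from typing import Dict, Any, List, Optional
--
-- def _generate_equipment_insights(rows: List[Dict]) -> List[str]:
--     """Generate equipment specific insights (direct counting, no status table)."""
--     if not rows:
--         return ['No equipment data available']
--     breakdown = sum(1 for r in rows if r.get('Status') == 'breakdown')
--     maintenance = sum(1 for r in rows if r.get('Status') == 'maintenance')
--     insights = []
--     if breakdown > 0: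
--         insights.append(f"{breakdown} machines in breakdown status - immediate attention needed")
--     if maintenance > 0:
--         insights.append(f"{maintenance} machines in maintenance")
--     return insights
-- ===== Notes on version B (the rewrite author's own statement) =====
-- stated objective: simpler
-- what changed: Replaces the general status-count dictionary build (and its non-empty-dict guard) with two direct count passes for the only two statuses ever reported.
import Mathlib
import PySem

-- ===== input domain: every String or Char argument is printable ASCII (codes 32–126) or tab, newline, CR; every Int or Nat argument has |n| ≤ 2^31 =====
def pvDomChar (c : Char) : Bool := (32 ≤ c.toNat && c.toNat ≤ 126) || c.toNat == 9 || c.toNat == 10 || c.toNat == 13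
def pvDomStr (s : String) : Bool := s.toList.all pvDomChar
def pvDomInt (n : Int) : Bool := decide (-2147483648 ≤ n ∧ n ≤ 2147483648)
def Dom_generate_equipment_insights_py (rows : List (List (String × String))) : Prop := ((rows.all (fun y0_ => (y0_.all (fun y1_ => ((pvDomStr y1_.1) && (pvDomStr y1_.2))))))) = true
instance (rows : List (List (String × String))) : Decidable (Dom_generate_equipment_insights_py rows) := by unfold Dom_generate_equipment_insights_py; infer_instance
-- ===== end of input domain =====

-- B replaces A's status-count dictionary with two direct count passes for the two reported
-- statuses (objective: simpler).

-- ===== PORT A =====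
-- row.get('Status') on the row dict (first match in the association list)
def pvStatusOf (row : List (String × String)) : Option String :=
  (PySem.Dict.mk row).get? "Status"

-- one iteration of A's status_counts loop
def pvStep (d : PySem.Dict String Int) (row : List (String × String)) : PySem.Dict String Int :=
  match pvStatusOf row with
  | some s => if s ≠ "" then d.insert s (d.getD s 0 + 1) else d
  | none => d

def generate_equipment_insights_py (rows : List (List (String × String))) : List String :=
  if rows = [] then ["No equipment data available"]
  else
    -- status_counts built by the loop: only rows with a present, truthy (non-empty) Status count
    let sc : PySem.Dict String Int :=
      rows.foldl pvStep PySem.Dict.empty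
    if sc.items ≠ [] then
      let insights : List String :=
        if sc.getD "breakdown" 0 > 0 then
          [PySem.Int.toStr (sc.getD "breakdown" 0) ++ " machines in breakdown status - immediate attention needed"]
        else []
      if sc.getD "maintenance" 0 > 0 then
        insights ++ [PySem.Int.toStr (sc.getD "maintenance" 0) ++ " machines in maintenance"]
      else insights
    else []

-- ===== PORT B =====
def generate_equipment_insights_py_alt (rows : List (List (String × String))) : List String :=
  if rows = [] then ["No equipment data available"]
  else
    let breakdown : Int := (rows.countP (fun r => pvStatusOf r == some "breakdown") : Nat)
    let maintenance : Int := (rows.countP (fun r => pvStatusOf r == some "maintenance") : Nat)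
    (if breakdown > 0 then
      [PySem.Int.toStr breakdown ++ " machines in breakdown status - immediate attention needed"]
     else []) ++
    (if maintenance > 0 then
      [PySem.Int.toStr maintenance ++ " machines in maintenance"]
     else [])

-- ===== PRECONDITION & SPEC =====
def Spec_generate_equipment_insights_py (rows : List (List (String × String))) (out : List String) : Prop := out = generate_equipment_insights_py_alt rows
instance (rows : List (List (String × String))) (out : List String) : Decidable (Spec_generate_equipment_insights_py rows out) := by unfold Spec_generate_equipment_insights_py; infer_instance

-- ===== CLAIM (what is proved, stated in full; the proofs are below) =====
def Claim_equal_generate_equipment_insights_py : Prop := ∀ (rows : List (List (String × String))), Dom_generate_equipment_insights_py rows → Spec_generate_equipment_insights_py rows (generate_equipment_insights_py rows)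

-- ===== LEMMAS AND PROOFS =====

-- The count the dictionary loop accumulates at a non-empty key v equals a direct count pass.
theorem pv_getD_fold (rows : List (List (String × String))) (v : String) (hv : v ≠ "")
    (d : PySem.Dict String Int) :
    ((rows.foldl pvStep d).getD v 0)
      = d.getD v 0 + (rows.countP (fun r => pvStatusOf r == some v) : Nat) := by
  induction rows generalizing d with
  | nil => simp
  | cons row rest ih =>
    rw [List.foldl_cons, ih, List.countP_cons]
    rcases hs : pvStatusOf row with _ | s
    · simp [pvStep, hs]
    · by_cases he : s = ""
      · subst he
        simp [pvStep, hs, Ne.symm hv]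
      · by_cases hsv : s = v
        · subst hsv
          simp [pvStep, hs, he]
          omega
        · simp [pvStep, hs, he]
          rw [PySem.Dict.getD_insert, if_neg (fun h : v = s => hsv h.symm), if_neg hsv]
          omega

-- If the accumulated dictionary is empty, no row contributed, so both direct counts are zero.
theorem pv_items_empty (rows : List (List (String × String))) (v : String) (hv : v ≠ "")
    (h : (rows.foldl pvStep (PySem.Dict.empty : PySem.Dict String Int)).items = []) :
    rows.countP (fun r => pvStatusOf r == some v) = 0 := by
  have hd : rows.foldl pvStep (PySem.Dict.empty : PySem.Dict String Int) = PySem.Dict.empty :=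
    PySem.Dict.ext (by simpa using h)
  have := pv_getD_fold rows v hv PySem.Dict.empty
  rw [hd, PySem.Dict.getD_empty] at this
  omega

-- ===== VERDICT (by name: the statement is the Claim_ definition above) =====
theorem generate_equipment_insights_py_spec : Claim_equal_generate_equipment_insights_py := by
  intro rows _
  unfold Spec_generate_equipment_insights_py generate_equipment_insights_py generate_equipment_insights_py_alt
  by_cases h0 : rows = []
  · simp [h0]
  · simp only [if_neg h0]
    have hb := pv_getD_fold rows "breakdown" (by decide) PySem.Dict.empty
    have hm := pv_getD_fold rows "maintenance" (by decide) PySem.Dict.empty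
    rw [PySem.Dict.getD_empty, Int.zero_add] at hb hm
    by_cases hi : (rows.foldl pvStep (PySem.Dict.empty : PySem.Dict String Int)).items = []
    · have h1 := pv_items_empty rows "breakdown" (by decide) hi
      have h2 := pv_items_empty rows "maintenance" (by decide) hi
      simp [hi, h1, h2]
    · simp only [ne_eq, hi, not_false_eq_true, if_true, hb, hm]
      by_cases hbp : rows.countP (fun r => pvStatusOf r == some "breakdown") = 0 <;>
        by_cases hmp : rows.countP (fun r => pvStatusOf r == some "maintenance") = 0 <;>
          simp [hbp, hmp, Int.natCast_pos, Nat.pos_of_ne_zero]
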